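-- pv_equiv track=rewrite | github.com/rishi772001/Competetive-programming | problem solving/min string.py | solve
-- ===== SOURCE A (Python) =====
-- def solve(s, t):
--     s_dict = {}
--     t_dict = {}
--
--     ans = 0
--
--     for i in s:
--         if i in s_dict:
--             s_dict[i] += 1
--         else:
--             s_dict[i] = 1
--
--     for i in t:
--         if i in t_dict:
--             t_dict[i] += 1
--         else:
--             t_dict[i] = 1
--
--
--     for i in s_dict:
--         if i in t_dict:
--             ans += max(0, s_dict[i] - t_dict[i])
--         else:
--             ans += s_dict[i]
--
--     return ans
-- ===== SOURCE B (Python) =====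
-- def solve(s, t):
--     # Greedy matching: each char of t can "cancel" one equal char of s.
--     # Walk s once, spending budget where possible; unmatched chars are the surplus.
--     budget = {}
--     for c in t:
--         budget[c] = budget.get(c, 0) + 1
--     ans = 0
--     for c in s:
--         if budget.get(c, 0) > 0:
--             budget[c] = budget[c] - 1
--         else:
--             ans += 1
--     return ans
-- ===== Notes on version B (the rewrite author's own statement) =====
-- stated objective: alternative
-- what changed: B replaces A's three staged loops (two frequency dicts, then a keyed surplus sum with a present/absent branch and max) by a greedy matching pass: it builds only t's budget and walks s once, decrementing the budget where a char can be cancelled and counting each unmatched char directly, so no per-distinct-key loop, no max and no second frequency table exist.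
import Mathlib
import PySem

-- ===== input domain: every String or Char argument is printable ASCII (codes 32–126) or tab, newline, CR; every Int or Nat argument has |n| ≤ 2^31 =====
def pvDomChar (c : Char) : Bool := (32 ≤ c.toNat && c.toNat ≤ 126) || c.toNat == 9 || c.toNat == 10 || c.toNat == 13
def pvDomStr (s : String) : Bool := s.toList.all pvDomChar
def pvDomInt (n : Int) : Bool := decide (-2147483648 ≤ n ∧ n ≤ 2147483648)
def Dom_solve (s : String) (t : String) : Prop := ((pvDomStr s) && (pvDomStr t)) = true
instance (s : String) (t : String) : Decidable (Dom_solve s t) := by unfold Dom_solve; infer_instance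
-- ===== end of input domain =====

-- B replaces A's three staged loops (two count dicts + keyed surplus sum) by a greedy
-- matching pass over s that spends a budget built from t (objective: alternative).

-- ===== PORT A =====
def solve (s : String) (t : String) : Int :=
  let s_dict : PySem.Dict Char Int :=
    s.toList.foldl (fun d i => if d.contains i then d.modify i 0 (· + 1) else d.insert i 1)
      PySem.Dict.empty
  let t_dict : PySem.Dict Char Int :=
    t.toList.foldl (fun d i => if d.contains i then d.modify i 0 (· + 1) else d.insert i 1)
      PySem.Dict.empty
  s_dict.keys.foldl
    (fun ans i =>
      if t_dict.contains i then ans + max 0 (s_dict.getD i 0 - t_dict.getD i 0)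
      else ans + s_dict.getD i 0) 0

-- ===== PORT B =====
def solve_alt (s : String) (t : String) : Int :=
  let budget : PySem.Dict Char Int :=
    t.toList.foldl (fun d c => d.insert c (d.getD c 0 + 1)) PySem.Dict.empty
  let r :=
    s.toList.foldl
      (fun (st : PySem.Dict Char Int × Int) c =>
        if st.1.getD c 0 > 0 then (st.1.insert c (st.1.getD c 0 - 1), st.2)
        else (st.1, st.2 + 1)) (budget, 0)
  r.2

-- ===== PRECONDITION & SPEC =====
def Spec_solve (s : String) (t : String) (out : Int) : Prop := out = solve_alt s t
instance (s : String) (t : String) (out : Int) : Decidable (Spec_solve s t out) := by unfold Spec_solve; infer_instance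

-- ===== CLAIM (what is proved, stated in full; the proofs are below) =====
def Claim_equal_solve : Prop := ∀ (s : String) (t : String), Dom_solve s t → Spec_solve s t (solve s t)

-- ===== LEMMAS AND PROOFS =====

-- getD with default 0 on an absent key is 0 (glue between contains and getD)
theorem pv_getD_absent (d : PySem.Dict Char Int) (i : Char) (h : ¬ d.contains i = true) :
    d.getD i 0 = 0 := by
  simp only [PySem.Dict.contains, List.any_eq_true, beq_iff_eq, Prod.exists, exists_and_right,
    exists_eq_right, not_exists, PySem.Dict.getD, PySem.Dict.get?] at *
  rw [List.find?_eq_none.mpr]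
  · rfl
  · intro p hp
    simp only [beq_iff_eq]
    intro he
    exact h p.2 (by simpa [← he] using hp)

-- A's 'if key present then += 1 else = 1' step is exactly Dict.modify with default 0.
theorem count_step_eq_modify (d : PySem.Dict Char Int) (i : Char) :
    (if d.contains i then d.modify i 0 (· + 1) else d.insert i 1) = d.modify i 0 (· + 1) := by
  by_cases h : d.contains i = true
  · simp [h]
  · simp [h, PySem.Dict.insert, PySem.Dict.modify, pv_getD_absent d i h]

-- sum over a nodup list of a function changed at one member
theorem pv_sum_update (ks : List Char) (f g : Char → Int) (c : Char)
    (hnd : ks.Nodup) (hc : c ∈ ks) (h : ∀ e ∈ ks, e ≠ c → g e = f e) :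
    (ks.map g).sum = (ks.map f).sum + (g c - f c) := by
  induction ks with
  | nil => cases hc
  | cons k ks ih =>
    rcases List.nodup_cons.mp hnd with ⟨hk, hnd'⟩
    by_cases hkc : c = k
    · subst hkc
      have : ks.map g = ks.map f :=
        List.map_congr_left (fun e he => h e (List.mem_cons_of_mem _ he)
          (fun hec => hk (hec ▸ he)))
      simp [this]; ring
    · have hc' : c ∈ ks := by
        rcases List.mem_cons.mp hc with h1 | h1
        · exact absurd h1 hkc
        · exact h1
      have hgk : g k = f k := h k (List.mem_cons_self) (fun hkc' => hkc hkc'.symm)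
      have := ih hnd' hc' (fun e he hne => h e (List.mem_cons_of_mem _ he) hne)
      simp [hgk, this]; ring

-- the greedy matching fold computes the per-distinct-character surplus sum
theorem pv_greedy_eq_sum (l : List Char) : ∀ (d : PySem.Dict Char Int) (a : Int),
    (∀ e, 0 ≤ d.getD e 0) →
    (l.foldl
      (fun (st : PySem.Dict Char Int × Int) c =>
        if st.1.getD c 0 > 0 then (st.1.insert c (st.1.getD c 0 - 1), st.2)
        else (st.1, st.2 + 1)) (d, a)).2
    = a + ((PySem.Set.ofList l).map
        (fun e => max 0 ((l.count e : Int) - d.getD e 0))).sum := by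
  induction l with
  | nil => intro d a _; simp [PySem.Set.ofList_nil]
  | cons c l ih =>
    intro d a hnn
    -- the sum over ofList (c::l) as a sum over (a permutation of) ofList l
    have hperm : ∀ (g : Char → Int),
        c ∈ l → ((PySem.Set.ofList (c :: l)).map g).sum = ((PySem.Set.ofList l).map g).sum := by
      intro g hcl
      have hp : List.Perm (PySem.Set.ofList (c :: l)) (PySem.Set.ofList l) := by
        rw [List.perm_ext_iff_of_nodup (PySem.Set.nodup_ofList _) (PySem.Set.nodup_ofList _)]
        intro e
        simp [PySem.Set.mem_ofList, List.mem_cons, or_iff_right_iff_imp]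
        intro he; exact he ▸ hcl
      exact (hp.map g).sum_eq
    have hperm' : ∀ (g : Char → Int),
        c ∉ l → ((PySem.Set.ofList (c :: l)).map g).sum = g c + ((PySem.Set.ofList l).map g).sum := by
      intro g hcl
      have hp : List.Perm (PySem.Set.ofList (c :: l)) (c :: PySem.Set.ofList l) := by
        rw [List.perm_ext_iff_of_nodup (PySem.Set.nodup_ofList _)
          (List.nodup_cons.mpr ⟨by simpa [PySem.Set.mem_ofList] using hcl,
            PySem.Set.nodup_ofList _⟩)]
        intro e
        simp [PySem.Set.mem_ofList, List.mem_cons]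
      have := (hp.map g).sum_eq
      simpa using this
    simp only [List.foldl_cons]
    by_cases h : d.getD c 0 > 0
    · -- budget available: cancel one occurrence of c
      simp only [h, if_pos]
      set d' := d.insert c (d.getD c 0 - 1) with hd'
      have hnn' : ∀ e, 0 ≤ d'.getD e 0 := by
        intro e
        rw [hd', PySem.Dict.getD_insert]
        by_cases hec : e = c
        · simp [hec]; omega
        · simp [hec]; exact hnn e
      rw [ih d' a hnn']
      congr 1
      have hgf : ∀ e ∈ PySem.Set.ofList l, e ≠ c →
          max 0 (((c :: l).count e : Int) - d.getD e 0)
            = max 0 ((l.count e : Int) - d'.getD e 0) := by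
        intro e _ hec
        rw [hd', PySem.Dict.getD_insert]
        simp [hec, Ne.symm hec]
      have hcval : max 0 (((c :: l).count c : Int) - d.getD c 0)
          = max 0 ((l.count c : Int) - d'.getD c 0) := by
        rw [hd', PySem.Dict.getD_insert]
        simp [List.count_cons_self]
        omega
      by_cases hcl : c ∈ l
      · rw [hperm _ hcl,
          pv_sum_update _ (fun e => max 0 ((l.count e : Int) - d'.getD e 0)) _ c
            (PySem.Set.nodup_ofList _) (by simpa [PySem.Set.mem_ofList] using hcl) hgf,
          hcval]
        ring
      · rw [hperm' _ hcl]
        have : max 0 (((c :: l).count c : Int) - d.getD c 0) = 0 := by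
          simp [List.count_cons_self, List.count_eq_zero_of_not_mem hcl]
          omega
        rw [this, List.map_congr_left (fun e he => hgf e he
          (fun hec => hcl (hec ▸ (by simpa [PySem.Set.mem_ofList] using he))))]
        ring
    · -- no budget: this char is surplus
      simp only [h, if_neg, not_false_iff]
      have hzero : d.getD c 0 = 0 := le_antisymm (by omega) (hnn c)
      rw [ih d (a + 1) hnn]
      have hgf : ∀ e ∈ PySem.Set.ofList l, e ≠ c →
          max 0 (((c :: l).count e : Int) - d.getD e 0)
            = max 0 ((l.count e : Int) - d.getD e 0) := by
        intro e _ hec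
        simp [Ne.symm hec]
      have hcval : max 0 (((c :: l).count c : Int) - d.getD c 0)
          = max 0 ((l.count c : Int) - d.getD c 0) + 1 := by
        rw [List.count_cons_self, hzero]
        have : (0 : Int) ≤ (l.count c : Int) := Int.natCast_nonneg _
        omega
      by_cases hcl : c ∈ l
      · rw [hperm _ hcl,
          pv_sum_update _ (fun e => max 0 ((l.count e : Int) - d.getD e 0)) _ c
            (PySem.Set.nodup_ofList _) (by simpa [PySem.Set.mem_ofList] using hcl) hgf,
          hcval]
        ring
      · have hfz : max 0 ((l.count c : Int) - d.getD c 0) = 0 := by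
          simp [List.count_eq_zero_of_not_mem hcl, hzero]
        rw [hperm' _ hcl, hcval, hfz,
          List.map_congr_left (fun e he => hgf e he
            (fun hec => hcl (hec ▸ (by simpa [PySem.Set.mem_ofList] using he))))]
        ring

theorem solve_eq (s t : String) : solve s t = solve_alt s t := by
  have hbuild : ∀ (l : List Char),
      l.foldl (fun d i => if d.contains i then d.modify i 0 (· + 1) else d.insert i 1)
        PySem.Dict.empty = PySem.Dict.counter l := by
    intro l
    rw [PySem.Dict.counter_eq_foldl]
    apply PySem.List.foldl_congr_mem
    intro d i _
    exact count_step_eq_modify d i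
  unfold solve solve_alt
  dsimp only
  rw [hbuild, hbuild, PySem.Dict.foldl_insert_getD_add_one_eq_counter]
  have houter :
      (PySem.Dict.counter s.toList).keys.foldl
        (fun ans i =>
          if (PySem.Dict.counter t.toList).contains i then
            ans + max 0 ((PySem.Dict.counter s.toList).getD i 0 -
              (PySem.Dict.counter t.toList).getD i 0)
          else ans + (PySem.Dict.counter s.toList).getD i 0) 0
      = (PySem.Dict.counter s.toList).keys.foldl
        (fun ans i =>
          ans + max 0 ((s.toList.count i : Int) - (PySem.Dict.counter t.toList).getD i 0)) 0 := by
    apply PySem.List.foldl_congr_mem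
    intro ans i _
    by_cases h : (PySem.Dict.counter t.toList).contains i = true
    · simp [h, PySem.Dict.getD_counter]
    · have ht : (PySem.Dict.counter t.toList).getD i 0 = 0 := pv_getD_absent _ _ h
      simp [h, ht, PySem.Dict.getD_counter]
  rw [houter, PySem.List.foldl_add, PySem.Dict.keys_counter,
    pv_greedy_eq_sum s.toList (PySem.Dict.counter t.toList) 0
      (fun e => by rw [PySem.Dict.getD_counter]; exact Int.natCast_nonneg _)]

-- ===== VERDICT (by name: the statement is the Claim_ definition above) =====
theorem solve_spec : Claim_equal_solve := by
  intro s t _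
  unfold Spec_solve
  exact solve_eq s t
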